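-- pv_equiv track=rewrite | github.com/projectescape/cp-archive | NC/longest-consecutive-sequence.py | getLongestSequence
-- ===== SOURCE A (Python) =====
-- def getLongestSequence(numSet, numTraversed, num):
--     if numTraversed.get(num, False) == True:
--         return 1
--
--     ans = 1
--
--     numTraversed[num] = True
--
--     curr = num - 1
--
--     while curr in numSet:
--         ans += 1
--         numTraversed[curr] = True
--         curr -= 1
--
--     curr = num + 1
--
--     while curr in numSet:
--         ans += 1
--         numTraversed[curr] = True
--         curr += 1
--
--     return ans
-- ===== SOURCE B (Python) =====
-- def getLongestSequence(numSet, numTraversed, num):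
--     if numTraversed.get(num, False) == True:
--         return 1
--     vals = sorted(set(numSet))
--     high = num
--     for v in vals:            # ascending sweep extends the upper end
--         if v == high + 1:
--             high = v
--     low = num
--     for v in reversed(vals):  # descending sweep extends the lower end
--         if v == low - 1:
--             low = v
--     for k in range(low, high + 1):
--         numTraversed[k] = True
--     return high - low + 1
-- ===== Notes on version B (the rewrite author's own statement) =====
-- stated objective: alternative
-- what changed: B replaces A's membership-probing expansion (two while-loops testing curr in numSet step by step) with a sort-then-scan algorithm: it sorts the distinct values once and finds the run's endpoints by one ascending and one descending linear sweep over the sorted list, returning high - low + 1 in closed form.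
import Mathlib
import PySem

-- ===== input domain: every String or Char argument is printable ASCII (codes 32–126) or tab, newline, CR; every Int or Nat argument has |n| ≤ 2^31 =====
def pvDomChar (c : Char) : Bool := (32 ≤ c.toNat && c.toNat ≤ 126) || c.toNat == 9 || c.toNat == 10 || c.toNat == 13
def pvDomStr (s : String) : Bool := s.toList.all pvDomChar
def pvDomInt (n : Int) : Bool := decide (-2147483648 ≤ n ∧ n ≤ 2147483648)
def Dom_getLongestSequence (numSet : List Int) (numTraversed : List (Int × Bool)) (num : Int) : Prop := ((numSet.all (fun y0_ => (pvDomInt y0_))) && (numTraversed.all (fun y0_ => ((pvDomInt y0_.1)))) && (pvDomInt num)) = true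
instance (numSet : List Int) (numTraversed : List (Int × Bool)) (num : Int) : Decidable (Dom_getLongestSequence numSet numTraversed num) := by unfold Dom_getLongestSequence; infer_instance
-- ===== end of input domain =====

-- B finds the run's endpoints by sorting the distinct values and sweeping the sorted list once in
-- each direction, instead of A's step-by-step membership probing (objective: alternative).
-- Both Pythons mutate numTraversed in place (same key set, different order); the equivalence proved
-- here is about the RETURN value only.

-- ===== PORT A =====
-- A's first while loop: curr walks down while in numSet, incrementing ans.
-- Fuel = numSet.length bounds the iterations (each successful step confirms a distinct member),
-- so the fuel guard never changes the result; it only makes the recursion total.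
def pvDownA (numSet : List Int) : Nat → Int → Int → Int
  | 0, _, ans => ans
  | fuel+1, curr, ans =>
    if numSet.contains curr then pvDownA numSet fuel (curr - 1) (ans + 1) else ans

-- A's second while loop: curr walks up while in numSet, incrementing ans.
def pvUpA (numSet : List Int) : Nat → Int → Int → Int
  | 0, _, ans => ans
  | fuel+1, curr, ans =>
    if numSet.contains curr then pvUpA numSet fuel (curr + 1) (ans + 1) else ans

def getLongestSequence (numSet : List Int) (numTraversed : List (Int × Bool)) (num : Int) : Int :=
  if (PySem.Dict.mk numTraversed).getD num false == true then 1
  else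
    let ans := pvDownA numSet numSet.length (num - 1) 1
    pvUpA numSet numSet.length (num + 1) ans

-- ===== PORT B =====
-- B's ascending sweep over the sorted distinct values: extend high whenever v == high + 1.
def pvUpScan (vals : List Int) (h : Int) : Int :=
  vals.foldl (fun h v => if v = h + 1 then v else h) h

-- B's descending sweep (for v in reversed(vals)): extend low whenever v == low - 1.
def pvDownScan (vals : List Int) (l : Int) : Int :=
  vals.reverse.foldl (fun l v => if v = l - 1 then v else l) l

def getLongestSequence_alt (numSet : List Int) (numTraversed : List (Int × Bool)) (num : Int) : Int :=
  if (PySem.Dict.mk numTraversed).getD num false == true then 1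
  else
    let vals := PySem.List.sorted (PySem.Set.ofList numSet) (fun x => x)
    let high := pvUpScan vals num
    let low := pvDownScan vals num
    high - low + 1

-- ===== PRECONDITION & SPEC =====
def Spec_getLongestSequence (numSet : List Int) (numTraversed : List (Int × Bool)) (num : Int) (out : Int) : Prop := out = getLongestSequence_alt numSet numTraversed num
instance (numSet : List Int) (numTraversed : List (Int × Bool)) (num : Int) (out : Int) : Decidable (Spec_getLongestSequence numSet numTraversed num out) := by unfold Spec_getLongestSequence; infer_instance

-- ===== CLAIM (what is proved, stated in full; the proofs are below) =====
def Claim_equal_getLongestSequence : Prop := ∀ (numSet : List Int) (numTraversed : List (Int × Bool)) (num : Int), Dom_getLongestSequence numSet numTraversed num → Spec_getLongestSequence numSet numTraversed num (getLongestSequence numSet numTraversed num)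

-- ===== LEMMAS AND PROOFS =====

-- A's down-counter equals ans + (start − end point of its walk), via the endpoint-only recursion below.
def pvFindLow (numSet : List Int) : Nat → Int → Int
  | 0, low => low
  | fuel+1, low => if numSet.contains (low - 1) then pvFindLow numSet fuel (low - 1) else low

def pvFindHigh (numSet : List Int) : Nat → Int → Int
  | 0, high => high
  | fuel+1, high => if numSet.contains (high + 1) then pvFindHigh numSet fuel (high + 1) else high

theorem pvDownA_eq (numSet : List Int) (fuel : Nat) :
    ∀ (curr ans : Int), pvDownA numSet fuel curr ans = ans + (curr + 1 - pvFindLow numSet fuel (curr + 1)) := by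
  induction fuel with
  | zero => intro curr ans; simp [pvDownA, pvFindLow]
  | succ n ih =>
    intro curr ans
    simp only [pvDownA, pvFindLow, add_sub_cancel_right]
    split_ifs with h
    · rw [ih, show curr - 1 + 1 = curr from by omega]; omega
    · omega

theorem pvUpA_eq (numSet : List Int) (fuel : Nat) :
    ∀ (curr ans : Int), pvUpA numSet fuel curr ans = ans + (pvFindHigh numSet fuel (curr - 1) - (curr - 1)) := by
  induction fuel with
  | zero => intro curr ans; simp [pvUpA, pvFindHigh]
  | succ n ih =>
    intro curr ans
    simp only [pvUpA, pvFindHigh, sub_add_cancel]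
    split_ifs with h
    · rw [ih, show curr + 1 - 1 = curr from by omega]; omega
    · omega

-- pvFindHigh is determined by the endpoint's characterisation, given enough fuel.
theorem pvFindHigh_eq (numSet : List Int) (fuel : Nat) :
    ∀ (s H : Int), s ≤ H → H - s ≤ (fuel : Int) →
    (∀ k, s < k → k ≤ H → numSet.contains k) → ¬ numSet.contains (H + 1) →
    pvFindHigh numSet fuel s = H := by
  induction fuel with
  | zero =>
    intro s H h1 h2 _ _
    have : s = H := by omega
    simp [pvFindHigh, this]
  | succ n ih =>
    intro s H h1 h2 hmem hstop
    by_cases hsH : s = H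
    · subst hsH
      simp only [pvFindHigh]
      rw [if_neg hstop]
    · have hlt : s < H := lt_of_le_of_ne h1 hsH
      have hc : numSet.contains (s + 1) := hmem (s + 1) (by omega) (by omega)
      simp only [pvFindHigh, hc, if_true]
      exact ih (s + 1) H (by omega) (by push_cast at h2 ⊢; omega)
        (fun k hk1 hk2 => hmem k (by omega) hk2) hstop

theorem pvFindLow_eq (numSet : List Int) (fuel : Nat) :
    ∀ (s L : Int), L ≤ s → s - L ≤ (fuel : Int) →
    (∀ k, L ≤ k → k < s → numSet.contains k) → ¬ numSet.contains (L - 1) →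
    pvFindLow numSet fuel s = L := by
  induction fuel with
  | zero =>
    intro s L h1 h2 _ _
    have : s = L := by omega
    simp [pvFindLow, this]
  | succ n ih =>
    intro s L h1 h2 hmem hstop
    by_cases hsL : s = L
    · subst hsL
      simp only [pvFindLow]
      rw [if_neg hstop]
    · have hlt : L < s := lt_of_le_of_ne h1 (Ne.symm hsL)
      have hc : numSet.contains (s - 1) := hmem (s - 1) (by omega) (by omega)
      simp only [pvFindLow, hc, if_true]
      exact ih (s - 1) L (by omega) (by push_cast at h2 ⊢; omega)
        (fun k hk1 hk2 => hmem k hk1 (by omega)) hstop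

-- Characterisation of B's ascending sweep over a strictly increasing list.
theorem pvUpScan_spec (vals : List Int) (hs : vals.Pairwise (· < ·)) :
    ∀ (s : Int), s ≤ pvUpScan vals s ∧
      (∀ k, s < k → k ≤ pvUpScan vals s → k ∈ vals) ∧ (pvUpScan vals s + 1) ∉ vals := by
  induction vals with
  | nil => intro s; simp [pvUpScan]
  | cons v t ih =>
    rcases List.pairwise_cons.mp hs with ⟨hv, ht⟩
    intro s
    by_cases hvs : v = s + 1
    · subst hvs
      have step : pvUpScan ((s + 1) :: t) s = pvUpScan t (s + 1) := by
        simp [pvUpScan]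
      obtain ⟨h1, h2, h3⟩ := ih ht (s + 1)
      refine ⟨by rw [step]; omega, ?_, ?_⟩
      · intro k hk1 hk2
        rw [step] at hk2
        by_cases hk : k = s + 1
        · simp [hk]
        · exact List.mem_cons_of_mem _ (h2 k (by omega) hk2)
      · rw [step]
        intro hmem
        rcases List.mem_cons.mp hmem with h | h
        · omega
        · exact h3 h
    · have step : pvUpScan (v :: t) s = pvUpScan t s := by
        simp [pvUpScan, hvs]
      obtain ⟨h1, h2, h3⟩ := ih ht s
      refine ⟨by rw [step]; exact h1, ?_, ?_⟩
      · intro k hk1 hk2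
        rw [step] at hk2
        exact List.mem_cons_of_mem _ (h2 k hk1 hk2)
      · rw [step]
        intro hmem
        rcases List.mem_cons.mp hmem with h | h
        · -- pvUpScan t s + 1 = v : impossible in either subcase
          by_cases hvle : v ≤ s
          · omega
          · -- v > s and v ≠ s + 1, so v > s + 1; then the sweep never moved: pvUpScan t s = s
            have hstay : pvUpScan t s = s := by
              by_contra hne
              have hlt : s < pvUpScan t s := lt_of_le_of_ne h1 (Ne.symm hne)
              have : (s + 1) ∈ t := h2 (s + 1) (by omega) (by omega)
              have := hv _ this
              omega
            omega
        · exact h3 h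
-- Characterisation of B's descending sweep over a strictly decreasing list.
theorem pvDownScan_spec (ws : List Int) (hs : ws.Pairwise (· > ·)) :
    ∀ (s : Int),
      (ws.foldl (fun l v => if v = l - 1 then v else l) s) ≤ s ∧
      (∀ k, (ws.foldl (fun l v => if v = l - 1 then v else l) s) ≤ k → k < s → k ∈ ws) ∧
      ((ws.foldl (fun l v => if v = l - 1 then v else l) s) - 1) ∉ ws := by
  induction ws with
  | nil => intro s; simp
  | cons v t ih =>
    rcases List.pairwise_cons.mp hs with ⟨hv, ht⟩
    intro s
    by_cases hvs : v = s - 1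
    · subst hvs
      have step : (((s - 1) :: t).foldl (fun l v => if v = l - 1 then v else l) s)
          = t.foldl (fun l v => if v = l - 1 then v else l) (s - 1) := by simp
      obtain ⟨h1, h2, h3⟩ := ih ht (s - 1)
      refine ⟨by rw [step]; omega, ?_, ?_⟩
      · intro k hk1 hk2
        rw [step] at hk1
        by_cases hk : k = s - 1
        · simp [hk]
        · exact List.mem_cons_of_mem _ (h2 k hk1 (by omega))
      · rw [step]
        intro hmem
        rcases List.mem_cons.mp hmem with h | h
        · omega
        · exact h3 h
    · have step : ((v :: t).foldl (fun l v => if v = l - 1 then v else l) s)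
          = t.foldl (fun l v => if v = l - 1 then v else l) s := by simp [hvs]
      obtain ⟨h1, h2, h3⟩ := ih ht s
      refine ⟨by rw [step]; exact h1, ?_, ?_⟩
      · intro k hk1 hk2
        rw [step] at hk1
        exact List.mem_cons_of_mem _ (h2 k hk1 hk2)
      · rw [step]
        intro hmem
        rcases List.mem_cons.mp hmem with h | h
        · by_cases hvge : s ≤ v
          · omega
          · have hstay : t.foldl (fun l v => if v = l - 1 then v else l) s = s := by
              by_contra hne
              have hlt : t.foldl (fun l v => if v = l - 1 then v else l) s < s :=
                lt_of_le_of_ne h1 hne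
              have : (s - 1) ∈ t := h2 (s - 1) (by omega) (by omega)
              have := hv _ this
              omega
            omega
        · exact h3 h

-- Membership in the sorted distinct list is membership in numSet.
theorem mem_vals_iff (numSet : List Int) (x : Int) :
    x ∈ PySem.List.sorted (PySem.Set.ofList numSet) (fun y => y) ↔ x ∈ numSet := by
  rw [PySem.List.mem_sorted, PySem.Set.mem_ofList]

-- Pigeonhole: an integer interval of members of numSet has length ≤ numSet.length.
theorem interval_le_length (numSet : List Int) (a b : Int)
    (h : ∀ k, a < k → k ≤ b → k ∈ numSet) : b - a ≤ (numSet.length : Int) := by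
  by_cases hab : b ≤ a
  · omega
  · have hsub : PySem.List.pyRange (a + 1) (b + 1) 1 ⊆ numSet := by
      intro k hk
      rw [PySem.List.mem_pyRange_one] at hk
      exact h k (by omega) (by omega)
    have hnd := PySem.List.nodup_pyRange_one (a := a + 1) (b := b + 1)
    have := (List.subperm_of_subset hnd hsub).length_le
    rw [PySem.List.length_pyRange_one] at this
    omega

-- ===== VERDICT (by name: the statement is the Claim_ definition above) =====
theorem getLongestSequence_spec : Claim_equal_getLongestSequence := by
  intro numSet numTraversed num _
  unfold Spec_getLongestSequence getLongestSequence getLongestSequence_alt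
  split_ifs with h
  · rfl
  · simp only []
    rw [pvUpA_eq, pvDownA_eq,
      show num - 1 + 1 = num from by ring, show num + 1 - 1 = num from by ring]
    set vals := PySem.List.sorted (PySem.Set.ofList numSet) (fun x => x) with hvals
    have hpw : vals.Pairwise (· < ·) := by
      rw [hvals]; exact PySem.List.sorted_ofList_pairwise_lt numSet
    -- upper endpoint
    obtain ⟨hu1, hu2, hu3⟩ := pvUpScan_spec vals hpw num
    have hu2' : ∀ k, num < k → k ≤ pvUpScan vals num → numSet.contains k := by
      intro k hk1 hk2
      exact List.elem_eq_true_of_mem ((mem_vals_iff numSet k).mp (hu2 k hk1 hk2))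
    have hu3' : ¬ numSet.contains (pvUpScan vals num + 1) := by
      intro hc
      exact hu3 ((mem_vals_iff numSet _).mpr (List.mem_of_elem_eq_true hc))
    have hHi : pvFindHigh numSet numSet.length num = pvUpScan vals num :=
      pvFindHigh_eq numSet numSet.length num (pvUpScan vals num) hu1
        (interval_le_length numSet num (pvUpScan vals num)
          (fun k hk1 hk2 => (mem_vals_iff numSet k).mp (hu2 k hk1 hk2)))
        hu2' hu3'
    -- lower endpoint
    obtain ⟨hl1, hl2, hl3⟩ := pvDownScan_spec vals.reverse
      ((List.pairwise_reverse).mpr hpw) num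
    have hds : pvDownScan vals num
        = vals.reverse.foldl (fun l v => if v = l - 1 then v else l) num := rfl
    rw [← hds] at hl1 hl2 hl3
    have hmemrev : ∀ x, x ∈ vals.reverse ↔ x ∈ numSet := by
      intro x; rw [List.mem_reverse]; exact mem_vals_iff numSet x
    have hl2' : ∀ k, pvDownScan vals num ≤ k → k < num → numSet.contains k := by
      intro k hk1 hk2
      exact List.elem_eq_true_of_mem ((hmemrev k).mp (hl2 k hk1 hk2))
    have hl3' : ¬ numSet.contains (pvDownScan vals num - 1) := by
      intro hc
      exact hl3 ((hmemrev _).mpr (List.mem_of_elem_eq_true hc))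
    have hLo : pvFindLow numSet numSet.length num = pvDownScan vals num :=
      pvFindLow_eq numSet numSet.length num (pvDownScan vals num) hl1
        (by
          have := interval_le_length numSet (pvDownScan vals num - 1) (num - 1)
            (fun k hk1 hk2 => (hmemrev k).mp (hl2 k (by omega) (by omega)))
          omega)
        hl2' hl3'
    rw [hHi, hLo]
    ring
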